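-- pv_equiv track=rewrite | github.com/rajat4255/Matching-Characters | main.py | MatchingCharacters
-- ===== SOURCE A (Python) =====
-- def MatchingCharacters(strParam):
--
--  count1=0
--  for i in range(0,len(strParam)):
--     w=strParam[i]
--     temp=0
--     for j in range(i+1,len(strParam)):
--      if w==strParam[j]:
--             break
--      temp=temp+1
--     if temp>=((len(strParam)-1)-i):
--       temp=0
--     if temp>count1:
--       count1=temp
--
--
--
--  return count1
-- ===== SOURCE B (Python) =====
-- def MatchingCharacters(strParam):
--     last = {}
--     best = 0
--     for j, c in enumerate(strParam):
--         if c in last: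
--             gap = j - last[c] - 1
--             if gap > best:
--                 best = gap
--         last[c] = j
--     return best
-- ===== Notes on version B (the rewrite author's own statement) =====
-- stated objective: faster
-- what changed: Replaces the quadratic scan-forward-for-the-next-equal-character per index by a single left-to-right pass keeping a dict of each character's last-seen index, computing the gap between consecutive occurrences directly.
import Mathlib
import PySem

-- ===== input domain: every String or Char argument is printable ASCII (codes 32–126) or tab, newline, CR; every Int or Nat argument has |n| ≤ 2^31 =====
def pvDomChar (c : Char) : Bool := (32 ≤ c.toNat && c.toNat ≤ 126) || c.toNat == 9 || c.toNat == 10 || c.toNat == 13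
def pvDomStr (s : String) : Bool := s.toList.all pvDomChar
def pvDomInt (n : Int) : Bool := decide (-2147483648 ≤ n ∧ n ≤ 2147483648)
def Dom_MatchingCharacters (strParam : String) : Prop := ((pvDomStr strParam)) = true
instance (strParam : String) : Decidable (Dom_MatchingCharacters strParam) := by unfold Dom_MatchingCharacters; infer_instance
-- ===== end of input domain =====

-- B replaces A's quadratic forward scan per index by one pass over the string with a
-- dict of last-seen indices (asymptotically faster, O(n) vs O(n^2)).

-- ===== PORT A =====
-- A's inner loop 'for j in range(i+1, len): if w == strParam[j]: break; temp += 1',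
-- transcribed as a recursion over the characters after position i counting until a match.
def pvInnerA (w : Char) : List Char → Int
  | [] => 0
  | c :: rest => if w == c then 0 else pvInnerA w rest + 1

def MatchingCharacters (strParam : String) : Int :=
  let cs := strParam.toList
  let n : Int := PySem.Str.len strParam
  (PySem.List.pyRange 0 n 1).foldl (fun count1 i =>
    let w := PySem.List.pyGetD cs i ' '
    let temp := pvInnerA w (PySem.List.slice cs (some (i + 1)) none)
    let temp := if temp ≥ (n - 1) - i then 0 else temp
    if temp > count1 then temp else count1) 0

-- ===== PORT B =====
def MatchingCharacters_alt (strParam : String) : Int :=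
  ((PySem.List.enumerate strParam.toList 0).foldl
    (fun (st : PySem.Dict Char Int × Int) (p : Int × Char) =>
      let best := match st.1.get? p.2 with
        | some i => let gap := p.1 - i - 1; if gap > st.2 then gap else st.2
        | none => st.2
      (st.1.insert p.2 p.1, best))
    (PySem.Dict.empty, 0)).2

-- ===== PRECONDITION & SPEC =====
def Spec_MatchingCharacters (strParam : String) (out : Int) : Prop := out = MatchingCharacters_alt strParam
instance (strParam : String) (out : Int) : Decidable (Spec_MatchingCharacters strParam out) := by unfold Spec_MatchingCharacters; infer_instance

-- ===== CLAIM (what is proved, stated in full; the proofs are below) =====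
def Claim_equal_MatchingCharacters : Prop := ∀ (strParam : String), Dom_MatchingCharacters strParam → Spec_MatchingCharacters strParam (MatchingCharacters strParam)

-- ===== LEMMAS AND PROOFS =====

-- A's contribution at Nat index i, on the list side.
def pvContrib (l : List Char) (i : Nat) : Int :=
  let w := l.getD i ' '
  let temp := pvInnerA w (l.drop (i + 1))
  if temp ≥ (l.length : Int) - 1 - i then 0 else temp

def pvAfold (l : List Char) : Int :=
  (List.range l.length).foldl (fun c1 i => max c1 (pvContrib l i)) 0

def pvStepB (st : PySem.Dict Char Int × Int) (p : Int × Char) : PySem.Dict Char Int × Int :=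
  let best := match st.1.get? p.2 with
    | some i => let gap := p.1 - i - 1; if gap > st.2 then gap else st.2
    | none => st.2
  (st.1.insert p.2 p.1, best)

def pvBfold (l : List Char) : PySem.Dict Char Int × Int :=
  (PySem.List.enumerate l 0).foldl pvStepB (PySem.Dict.empty, 0)

-- index (from the front) of the LAST occurrence of c in l, if any
def pvLastIdx? (c : Char) : List Char → Option Nat
  | [] => none
  | a :: t => match pvLastIdx? c t with
    | some i => some (i + 1)
    | none => if a = c then some 0 else none

theorem pvInnerA_of_not_mem (w : Char) (l : List Char) (h : w ∉ l) :
    pvInnerA w l = (l.length : Int) := by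
  induction l with
  | nil => simp [pvInnerA]
  | cons c t ih =>
    simp only [List.mem_cons, not_or] at h
    simp only [pvInnerA, beq_iff_eq, if_neg h.1, ih h.2, List.length_cons]
    push_cast; ring

theorem pvInnerA_lt_of_mem (w : Char) (l : List Char) (h : w ∈ l) :
    pvInnerA w l < (l.length : Int) := by
  induction l with
  | nil => simp at h
  | cons c t ih =>
    simp only [pvInnerA, beq_iff_eq, List.length_cons]
    by_cases hc : w = c
    · simp only [if_pos hc]; positivity
    · simp only [if_neg hc]
      rcases List.mem_cons.mp h with h' | h'
      · exact absurd h' hc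
      · have := ih h'; push_cast; omega

theorem pvInnerA_append_of_mem (w : Char) (l l' : List Char) (h : w ∈ l) :
    pvInnerA w (l ++ l') = pvInnerA w l := by
  induction l with
  | nil => simp at h
  | cons c t ih =>
    simp only [List.cons_append, pvInnerA, beq_iff_eq]
    by_cases hc : w = c
    · simp [hc]
    · rcases List.mem_cons.mp h with h' | h'
      · exact absurd h' hc
      · simp [hc, ih h']

theorem pvInnerA_append_of_not_mem (w : Char) (l l' : List Char) (h : w ∉ l) :
    pvInnerA w (l ++ l') = (l.length : Int) + pvInnerA w l' := by
  induction l with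
  | nil => simp
  | cons c t ih =>
    simp only [List.mem_cons, not_or] at h
    simp only [List.cons_append, pvInnerA, beq_iff_eq, if_neg h.1, ih h.2, List.length_cons]
    push_cast; ring

theorem pvLastIdx?_none (c : Char) (l : List Char) (h : pvLastIdx? c l = none) : c ∉ l := by
  induction l with
  | nil => simp
  | cons a t ih =>
    rcases ht : pvLastIdx? c t with _ | i
    · simp only [pvLastIdx?, ht] at h
      by_cases hac : a = c
      · rw [if_pos hac] at h; simp at h
      · simp only [List.mem_cons, not_or]
        exact ⟨fun he => hac he.symm, ih ht⟩
    · simp only [pvLastIdx?, ht] at h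
      simp at h

theorem pvLastIdx?_some (c : Char) (l : List Char) (i : Nat) (h : pvLastIdx? c l = some i) :
    i < l.length ∧ l.getD i ' ' = c ∧ c ∉ l.drop (i + 1) := by
  induction l generalizing i with
  | nil => simp [pvLastIdx?] at h
  | cons a t ih =>
    rcases ht : pvLastIdx? c t with _ | j
    · simp only [pvLastIdx?, ht] at h
      by_cases hac : a = c
      · rw [if_pos hac] at h
        obtain rfl : i = 0 := by simpa using h.symm
        exact ⟨by simp, by simpa using hac, by simpa using pvLastIdx?_none c t ht⟩
      · rw [if_neg hac] at h; simp at h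
    · simp only [pvLastIdx?, ht] at h
      obtain rfl : i = j + 1 := by simpa using h.symm
      obtain ⟨h1, h2, h3⟩ := ih j ht
      exact ⟨by simp; omega, by simpa using h2, by simpa using h3⟩

theorem pvLastIdx?_unique (c : Char) (l : List Char) (i : Nat) (h1 : i < l.length)
    (h2 : l.getD i ' ' = c) (h3 : c ∉ l.drop (i + 1)) : pvLastIdx? c l = some i := by
  induction l generalizing i with
  | nil => simp at h1
  | cons a t ih =>
    cases i with
    | zero =>
      simp only [List.getD_cons_zero] at h2
      have hn : pvLastIdx? c t = none := by
        rcases ht : pvLastIdx? c t with _ | j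
        · rfl
        · obtain ⟨hj1, hj2, _⟩ := pvLastIdx?_some c t j ht
          have hct : c ∈ t := by
            rw [← hj2, List.getD_eq_getElem _ _ hj1]; exact List.getElem_mem hj1
          exact absurd hct (by simpa using h3)
      simp [pvLastIdx?, hn, h2]
    | succ k =>
      simp only [List.length_cons] at h1
      have := ih k (by omega) (by simpa using h2) (by simpa using h3)
      simp [pvLastIdx?, this]

theorem pvLastIdx?_append_singleton (c a : Char) (l : List Char) :
    pvLastIdx? c (l ++ [a]) = if a = c then some l.length else pvLastIdx? c l := by
  induction l with
  | nil => simp [pvLastIdx?]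
  | cons b t ih =>
    simp only [List.cons_append, pvLastIdx?, ih, List.length_cons]
    by_cases hac : a = c
    · simp [hac]
    · simp only [if_neg hac]

-- fold of max over range where f and g differ only at i0, where g is 0 and f is ≥ 0
theorem pvFoldMaxUpdate (f g : Nat → Int) (n : Nat) :
    ∀ i0 : Nat, i0 < n → (∀ i, i < n → i ≠ i0 → f i = g i) → g i0 = 0 → 0 ≤ f i0 →
    (List.range n).foldl (fun c i => max c (f i)) 0 =
      max ((List.range n).foldl (fun c i => max c (g i)) 0) (f i0) := by
  induction n with
  | zero => intro i0 h0 _ _ _; omega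
  | succ m ih =>
    intro i0 h0 hfg hg0 hf0
    rw [List.range_succ, List.foldl_append, List.foldl_append]
    simp only [List.foldl_cons, List.foldl_nil]
    by_cases hm : i0 = m
    · subst hm
      have hcongr : (List.range i0).foldl (fun c i => max c (f i)) 0 =
          (List.range i0).foldl (fun c i => max c (g i)) 0 := by
        apply PySem.List.foldl_congr_mem
        intro b x hx
        rw [hfg x (by have := List.mem_range.mp hx; omega) (by have := List.mem_range.mp hx; omega)]
      have hnn : 0 ≤ (List.range i0).foldl (fun c i => max c (g i)) 0 := by
        rw [← List.foldl_map]
        exact (PySem.List.le_foldl_max _ _).1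
      rw [hcongr, hg0]
      omega
    · rw [ih i0 (by omega) (fun i hi hne => hfg i (by omega) hne) hg0 hf0,
        hfg m (by omega) (Ne.symm hm)]
      omega

theorem pvContrib_append_ne (l : List Char) (a : Char) (i : Nat) (hi : i < l.length)
    (hne : pvLastIdx? a l ≠ some i) : pvContrib (l ++ [a]) i = pvContrib l i := by
  have hgd : (l ++ [a]).getD i ' ' = l.getD i ' ' := by
    simp [List.getD, List.getElem?_append_left hi]
  have hdrop : (l ++ [a]).drop (i + 1) = l.drop (i + 1) ++ [a] :=
    List.drop_append_of_le_length (by omega)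
  have hlen2 : (((l ++ [a]).length : Int)) = (l.length : Int) + 1 := by simp
  set w := l.getD i ' ' with hw
  by_cases hmem : w ∈ l.drop (i + 1)
  · have hlt := pvInnerA_lt_of_mem w _ hmem
    have hlen : ((l.drop (i + 1)).length : Int) = (l.length : Int) - 1 - i := by
      simp [List.length_drop]; omega
    simp only [pvContrib, hgd, hdrop, ← hw, pvInnerA_append_of_mem w _ _ hmem]
    rw [if_neg (by omega), if_neg (by omega)]
  · have heq : pvInnerA w (l.drop (i + 1)) = ((l.drop (i + 1)).length : Int) :=
      pvInnerA_of_not_mem w _ hmem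
    have hlen : ((l.drop (i + 1)).length : Int) = (l.length : Int) - 1 - i := by
      simp [List.length_drop]; omega
    have hwa : w ≠ a := by
      intro h
      exact hne (pvLastIdx?_unique a l i hi (h ▸ hw.symm) (h ▸ hmem))
    simp only [pvContrib, hgd, hdrop, ← hw,
      pvInnerA_append_of_not_mem w _ _ hmem]
    have h1 : pvInnerA w [a] = 1 := by
      simp [pvInnerA, beq_iff_eq, hwa]
    rw [h1, heq, if_pos (by omega), if_pos (by omega)]

theorem pvContrib_append_last (l : List Char) (a : Char) (i : Nat)
    (h : pvLastIdx? a l = some i) :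
    pvContrib l i = 0 ∧ pvContrib (l ++ [a]) i = (l.length : Int) - i - 1 := by
  obtain ⟨h1, h2, h3⟩ := pvLastIdx?_some a l i h
  have hgd : (l ++ [a]).getD i ' ' = l.getD i ' ' := by
    simp [List.getD, List.getElem?_append_left h1]
  have hdrop : (l ++ [a]).drop (i + 1) = l.drop (i + 1) ++ [a] :=
    List.drop_append_of_le_length (by omega)
  have hmem : a ∉ l.drop (i + 1) := h3
  have heq : pvInnerA a (l.drop (i + 1)) = ((l.drop (i + 1)).length : Int) :=
    pvInnerA_of_not_mem a _ hmem
  have hlen : ((l.drop (i + 1)).length : Int) = (l.length : Int) - 1 - i := by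
    simp [List.length_drop]; omega
  have h0 : pvInnerA a [a] = 0 := by simp [pvInnerA]
  have hlen2 : (((l ++ [a]).length : Int)) = (l.length : Int) + 1 := by simp
  constructor
  · simp only [pvContrib, h2, heq]
    rw [if_pos (by omega)]
  · simp only [pvContrib, hgd, h2, hdrop, pvInnerA_append_of_not_mem a _ _ hmem, h0]
    rw [if_neg (by omega)]
    omega

theorem pvContrib_append_self (l : List Char) (a : Char) :
    pvContrib (l ++ [a]) l.length = 0 := by
  have hgd : (l ++ [a]).getD l.length ' ' = a := by
    simp [List.getD]
  have hdrop : (l ++ [a]).drop (l.length + 1) = [] := by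
    apply List.drop_eq_nil_of_le; simp
  simp only [pvContrib, hgd, hdrop, pvInnerA]
  rw [if_pos (by simp only [List.length_append, List.length_cons, List.length_nil]; push_cast; omega)]

-- A's fold over l ++ [a]: the only contribution that changes is at the last occurrence of a in l
theorem pvAfold_append (l : List Char) (a : Char) :
    pvAfold (l ++ [a]) = match pvLastIdx? a l with
      | some i => max (pvAfold l) ((l.length : Int) - i - 1)
      | none => pvAfold l := by
  have hlen : (l ++ [a]).length = l.length + 1 := by simp
  have hstep : pvAfold (l ++ [a]) =
      (List.range l.length).foldl (fun c i => max c (pvContrib (l ++ [a]) i)) 0 := by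
    unfold pvAfold
    rw [hlen, List.range_succ, List.foldl_append]
    simp only [List.foldl_cons, List.foldl_nil, pvContrib_append_self]
    have hnn : 0 ≤ (List.range l.length).foldl (fun c i => max c (pvContrib (l ++ [a]) i)) 0 := by
      rw [← List.foldl_map]
      exact (PySem.List.le_foldl_max _ _).1
    omega
  rcases h : pvLastIdx? a l with _ | i0
  · -- no occurrence of a in l: every contribution unchanged
    rw [hstep]
    unfold pvAfold
    apply PySem.List.foldl_congr_mem
    intro b x hx
    rw [pvContrib_append_ne l a x (List.mem_range.mp hx) (by simp [h])]
  · obtain ⟨hc0, hcnew⟩ := pvContrib_append_last l a i0 h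
    have hi0 := (pvLastIdx?_some a l i0 h).1
    rw [hstep]
    have hupd := pvFoldMaxUpdate (pvContrib (l ++ [a])) (pvContrib l)
      l.length i0 hi0
      (fun i hi hne => pvContrib_append_ne l a i hi (by
        intro hcontra; rw [h] at hcontra; exact hne (by injection hcontra with h'; omega)))
      hc0
      (by rw [hcnew]; omega)
    rw [hupd, hcnew]
    rfl

theorem pvBfold_append (l : List Char) (a : Char) :
    pvBfold (l ++ [a]) = pvStepB (pvBfold l) ((l.length : Int), a) := by
  unfold pvBfold
  rw [PySem.List.enumerate_append, List.foldl_append]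
  simp [PySem.List.enumerate_cons, PySem.List.enumerate_nil]

theorem pvBfold_fst (l : List Char) (c : Char) :
    (pvBfold l).1.get? c = (pvLastIdx? c l).map (fun i => (i : Int)) := by
  induction l using List.reverseRecOn with
  | nil => simp [pvBfold, PySem.List.enumerate_nil]; rfl
  | append_singleton t a ih =>
    rw [pvBfold_append, pvLastIdx?_append_singleton]
    simp only [pvStepB]
    rw [PySem.Dict.get?_insert]
    by_cases hca : c = a
    · simp [hca]
    · rw [if_neg hca, if_neg (fun h => hca h.symm), ih]

theorem pvMain (l : List Char) : pvAfold l = (pvBfold l).2 := by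
  induction l using List.reverseRecOn with
  | nil => simp [pvAfold, pvBfold, PySem.List.enumerate_nil]
  | append_singleton t a ih =>
    rw [pvAfold_append, pvBfold_append]
    rcases h : pvLastIdx? a t with _ | i
    · simp [pvStepB, pvBfold_fst, h, ← ih]
    · simp only [pvStepB, pvBfold_fst, h]
      rw [← ih]
      show max (pvAfold t) ((t.length : Int) - (i : Int) - 1) =
        if (t.length : Int) - (i : Int) - 1 > pvAfold t then (t.length : Int) - (i : Int) - 1
        else pvAfold t
      split_ifs with hgt <;> omega

theorem pvPortA_eq (s : String) : MatchingCharacters s = pvAfold s.toList := by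
  unfold MatchingCharacters pvAfold
  simp only [PySem.Str.len_eq]
  rw [PySem.List.pyRange_zero_nat, List.foldl_map]
  apply PySem.List.foldl_congr_mem
  intro b k _
  have h1 : PySem.List.pyGetD s.toList (k : Int) ' ' = s.toList.getD k ' ' :=
    PySem.List.pyGetD_natCast _ _ _
  have h2 : PySem.List.slice s.toList (some ((k : Int) + 1)) none = s.toList.drop (k + 1) := by
    have : ((k : Int) + 1) = ((k + 1 : Nat) : Int) := by push_cast; ring
    rw [this, PySem.List.slice_from_natCast]
  simp only [h1, h2, pvContrib]
  split_ifs <;> omega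

theorem pvPortB_eq (s : String) : MatchingCharacters_alt s = (pvBfold s.toList).2 := by
  rfl

-- ===== VERDICT (by name: the statement is the Claim_ definition above) =====
theorem MatchingCharacters_spec : Claim_equal_MatchingCharacters := by
  intro s _
  unfold Spec_MatchingCharacters
  rw [pvPortA_eq, pvPortB_eq, pvMain]
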